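-- pv_equiv track=rewrite | github.com/AtoBrightSide/contests | pastContests/D_Letter.py | solve
-- ===== SOURCE A (Python) =====
-- def solve(s):
--     flag = False
--     moves = 0
--     lows = ups = 0
--     for ch in s:
--         if flag and ch.isupper():
--             moves += 1
--         flag = flag or ch.islower()
--         lows += 1 if ch.islower() else 0
--         ups += 1 if ch.isupper() else 0
--
--     return min(moves, lows, ups, len(s) - moves - 1)
-- ===== SOURCE B (Python) =====
-- def solve(s):
--     ups = lows = moves = 0
--     for ch in reversed(s):
--         if ch.islower():
--             lows += 1
--             moves = ups
--         elif ch.isupper():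
--             ups += 1
--     return min(moves, lows, ups, len(s) - moves - 1)
-- ===== Notes on version B (the rewrite author's own statement) =====
-- stated objective: alternative
-- what changed: Scans the string right-to-left with no flag: it maintains the uppercase count of the suffix seen so far and overwrites moves with that count at every lowercase character, so the last overwrite (leftmost lowercase) yields A's forward flag-gated uppercase count.
import Mathlib
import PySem

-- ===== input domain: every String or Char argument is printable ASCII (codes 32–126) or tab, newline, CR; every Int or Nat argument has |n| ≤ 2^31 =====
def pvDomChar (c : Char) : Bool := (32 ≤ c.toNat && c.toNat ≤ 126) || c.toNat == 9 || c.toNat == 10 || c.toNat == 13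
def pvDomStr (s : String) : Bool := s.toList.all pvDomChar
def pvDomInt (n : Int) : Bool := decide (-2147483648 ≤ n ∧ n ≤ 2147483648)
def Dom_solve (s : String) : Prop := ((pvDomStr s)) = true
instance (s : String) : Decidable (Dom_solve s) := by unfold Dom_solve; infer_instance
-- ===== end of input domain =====

-- B scans right-to-left with no flag, overwriting moves with the uppercase-suffix count
-- at every lowercase: a different traversal and state, same O(n) cost.

-- ===== PORT A =====
-- one step of A's loop body, on state (flag, moves, lows, ups)
def solveStep (st : Bool × Int × Int × Int) (ch : Char) : Bool × Int × Int × Int :=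
  let moves := if st.1 && PySem.Chars.isupper ch then st.2.1 + 1 else st.2.1
  let flag := st.1 || PySem.Chars.islower ch
  let lows := st.2.2.1 + (if PySem.Chars.islower ch then (1 : Int) else 0)
  let ups := st.2.2.2 + (if PySem.Chars.isupper ch then (1 : Int) else 0)
  (flag, moves, lows, ups)

def solve (s : String) : Int :=
  let st := s.toList.foldl solveStep (false, 0, 0, 0)
  min (min (min st.2.1 st.2.2.1) st.2.2.2) ((s.toList.length : Int) - st.2.1 - 1)

-- ===== PORT B =====
-- one step of B's backward loop, on state (ups, lows, moves)
def altStep (st : Int × Int × Int) (ch : Char) : Int × Int × Int :=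
  if PySem.Chars.islower ch then (st.1, st.2.1 + 1, st.1)
  else if PySem.Chars.isupper ch then (st.1 + 1, st.2.1, st.2.2)
  else st

def solve_alt (s : String) : Int :=
  let st := s.toList.reverse.foldl altStep (0, 0, 0)
  min (min (min st.2.2 st.2.1) st.1) ((s.toList.length : Int) - st.2.2 - 1)

-- ===== PRECONDITION & SPEC =====
def Spec_solve (s : String) (out : Int) : Prop := out = solve_alt s
instance (s : String) (out : Int) : Decidable (Spec_solve s out) := by unfold Spec_solve; infer_instance

-- ===== CLAIM (what is proved, stated in full; the proofs are below) =====
def Claim_equal_solve : Prop := ∀ (s : String), Dom_solve s → Spec_solve s (solve s)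

-- ===== LEMMAS AND PROOFS =====

theorem low_not_up {c : Char} (h : PySem.Chars.islower c = true) :
    PySem.Chars.isupper c = false := by
  simp only [PySem.Chars.islower, Bool.and_eq_true, decide_eq_true_eq] at h
  unfold PySem.Chars.isupper
  rw [Bool.and_eq_false_iff]
  right
  simp only [decide_eq_false_iff_not]
  intro h3
  exact absurd (h.1.trans h3) (by decide)

-- A's moves value: uppercase count in the suffix after the first lowercase
def movesOf (cs : List Char) : Int :=
  match cs with
  | [] => 0
  | c :: t =>
      if PySem.Chars.islower c then (t.countP (fun ch => PySem.Chars.isupper ch) : Int)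
      else movesOf t

theorem fold_flag_true (l : List Char) : ∀ (m lo up : Int),
    l.foldl solveStep (true, m, lo, up) =
      (true, m + (l.countP (fun ch => PySem.Chars.isupper ch) : Int),
        lo + (l.countP (fun ch => PySem.Chars.islower ch) : Int),
        up + (l.countP (fun ch => PySem.Chars.isupper ch) : Int)) := by
  induction l with
  | nil => intro m lo up; simp
  | cons c t ih =>
    intro m lo up
    simp only [List.foldl_cons, solveStep, Bool.true_and, Bool.true_or, ih,
      List.countP_cons]
    by_cases hu : PySem.Chars.isupper c = true <;>
      by_cases hl : PySem.Chars.islower c = true <;>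
      simp [hu, hl] <;> omega

theorem fold_flag_false (l : List Char) : ∀ (m lo up : Int),
    l.foldl solveStep (false, m, lo, up) =
      (l.any (fun ch => PySem.Chars.islower ch), m + movesOf l,
        lo + (l.countP (fun ch => PySem.Chars.islower ch) : Int),
        up + (l.countP (fun ch => PySem.Chars.isupper ch) : Int)) := by
  induction l with
  | nil => intro m lo up; simp [movesOf]
  | cons c t ih =>
    intro m lo up
    by_cases hl : PySem.Chars.islower c = true
    · have hu : PySem.Chars.isupper c = false := low_not_up hl
      simp only [List.foldl_cons, solveStep, hl, hu, Bool.false_and,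
        Bool.false_or, if_true, fold_flag_true, List.any_cons, Bool.true_or,
        movesOf, List.countP_cons]
      simp
      omega
    · have hstep : solveStep (false, m, lo, up) c =
          (false, m, lo, up + (if PySem.Chars.isupper c then (1 : Int) else 0)) := by
        simp [solveStep, hl]
      rw [List.foldl_cons, hstep, ih]
      simp [List.any_cons, hl, List.countP_cons, movesOf]
      omega

-- B's backward fold computes (ups, lows, moves) of the list it is the reverse of
theorem fold_alt (l : List Char) :
    l.reverse.foldl altStep (0, 0, 0) =
      ((l.countP (fun ch => PySem.Chars.isupper ch) : Int),
       (l.countP (fun ch => PySem.Chars.islower ch) : Int),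
       movesOf l) := by
  rw [List.foldl_reverse]
  induction l with
  | nil => simp [movesOf]
  | cons c t ih =>
    rw [List.foldr_cons, ih]
    by_cases hl : PySem.Chars.islower c = true
    · have hu : PySem.Chars.isupper c = false := low_not_up hl
      simp [altStep, hl, hu, movesOf]
    · by_cases hu : PySem.Chars.isupper c = true <;>
        simp [altStep, hl, hu, movesOf]

-- ===== VERDICT (by name: the statement is the Claim_ definition above) =====
theorem solve_spec : Claim_equal_solve := by
  intro s _
  unfold Spec_solve solve solve_alt
  simp only [fold_flag_false, fold_alt, zero_add]
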